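-- pv_equiv track=rewrite | github.com/makehumancommunity/makehuman | makehuman/plugins/8_server_socket/meshops.py | _boolsToRunLenghtIdx
-- ===== SOURCE A (Python) =====
-- def _boolsToRunLenghtIdx(boolArray):
--     out = []
--     i = 0
--     needNewRun = True
--
--     while i < len(boolArray):
--         if boolArray[i]:
--             if needNewRun:
--                 out.append([i,i])
--                 needNewRun = False
--             out[ len(out) - 1 ][1] = i
--         else:
--             needNewRun = True
--         i = i + 1
--
--     return out
-- ===== SOURCE B (Python) =====
-- def _boolsToRunLenghtIdx(boolArray):
--     # Group consecutive elements of equal truthiness; emit [first, last] for true groups.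
--     out = []
--     i = 0
--     n = len(boolArray)
--     while i < n:
--         j = i + 1
--         while j < n and bool(boolArray[j]) == bool(boolArray[i]):
--             j += 1
--         if boolArray[i]:
--             out.append([i, j - 1])
--         i = j
--     return out
-- ===== Notes on version B (the rewrite author's own statement) =====
-- stated objective: alternative
-- what changed: Replaces A's per-element loop with needNewRun flag and in-place mutation of the last run's endpoint by a run-grouping scan: an inner loop finds the end of each maximal equal-truthiness run and a true run is appended once as [first, last].
import Mathlib
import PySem

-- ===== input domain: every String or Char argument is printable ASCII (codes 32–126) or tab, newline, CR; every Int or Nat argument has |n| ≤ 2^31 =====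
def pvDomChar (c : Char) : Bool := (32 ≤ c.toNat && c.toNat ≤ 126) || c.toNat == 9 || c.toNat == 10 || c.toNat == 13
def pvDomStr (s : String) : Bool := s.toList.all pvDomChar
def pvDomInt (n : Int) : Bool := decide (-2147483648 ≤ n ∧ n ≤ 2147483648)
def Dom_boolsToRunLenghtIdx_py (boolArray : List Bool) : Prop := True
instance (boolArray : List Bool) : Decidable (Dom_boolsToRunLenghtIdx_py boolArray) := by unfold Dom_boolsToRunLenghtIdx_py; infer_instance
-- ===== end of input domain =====

-- B replaces A's per-element needNewRun/end-mutation loop by a run-grouping scan (same O(n) cost; alternative decomposition).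


-- ===== PORT A =====
-- out[len(out)-1][1] = i  : replace the second entry of the last run
def pvSetLastEnd : List (List Int) → Int → List (List Int)
  | [], _ => []
  | [r], v => [r.set 1 v]
  | r :: rest, v => r :: pvSetLastEnd rest v

-- the while loop of A: state (i, out, needNewRun), one element per step
def pvAGo : Nat → List (List Int) → Bool → List Bool → List (List Int)
  | _, out, _, [] => out
  | i, out, need, b :: rest =>
    if b then
      let out1 := if need then out ++ [[(i : Int), (i : Int)]] else out
      pvAGo (i + 1) (pvSetLastEnd out1 (i : Int)) false rest
    else
      pvAGo (i + 1) out true rest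

def boolsToRunLenghtIdx_py (boolArray : List Bool) : List (List Int) :=
  pvAGo 0 [] true boolArray

-- ===== PORT B =====
-- Source B: inner while extends j over the maximal run of equal truthiness starting at i;
-- a true run is appended once as [i, j-1]; then i = j.
def pvBGo : Nat → List Bool → List (List Int)
  | _, [] => []
  | i, b :: rest =>
    let run := rest.takeWhile (fun x => x == b)
    let rest' := rest.dropWhile (fun x => x == b)
    if b then
      [(i : Int), ((i + run.length : Nat) : Int)] :: pvBGo (i + run.length + 1) rest'
    else
      pvBGo (i + run.length + 1) rest'
  termination_by _ l => l.length
  decreasing_by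
    all_goals simp only [List.length_cons]
    all_goals exact Nat.lt_succ_of_le (List.length_dropWhile_le _ _)

def boolsToRunLenghtIdx_py_alt (boolArray : List Bool) : List (List Int) :=
  pvBGo 0 boolArray

-- ===== PRECONDITION & SPEC =====
def Spec_boolsToRunLenghtIdx_py (boolArray : List Bool) (out : List (List Int)) : Prop := out = boolsToRunLenghtIdx_py_alt boolArray
instance (boolArray : List Bool) (out : List (List Int)) : Decidable (Spec_boolsToRunLenghtIdx_py boolArray out) := by unfold Spec_boolsToRunLenghtIdx_py; infer_instance

-- ===== CLAIM (what is proved, stated in full; the proofs are below) =====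
def Claim_equal_boolsToRunLenghtIdx_py : Prop := ∀ (boolArray : List Bool), Dom_boolsToRunLenghtIdx_py boolArray → Spec_boolsToRunLenghtIdx_py boolArray (boolsToRunLenghtIdx_py boolArray)

-- ===== LEMMAS AND PROOFS =====

-- "inside a true run started at s, next index j": streaming view of B's grouping
def pvInRun (s : Nat) : Nat → List Bool → List (List Int)
  | j, [] => [[(s : Int), (j : Int) - 1]]
  | j, true :: t => pvInRun s (j + 1) t
  | j, false :: t => [(s : Int), (j : Int) - 1] :: pvBGo (j + 1) t

theorem pvSetLastEnd_append (out : List (List Int)) (s e v : Int) :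
    pvSetLastEnd (out ++ [[s, e]]) v = out ++ [[s, v]] := by
  induction out with
  | nil => rfl
  | cons h t ih =>
      cases t with
      | nil => rfl
      | cons h2 t2 =>
          simp only [List.cons_append, pvSetLastEnd] at ih ⊢
          rw [ih]

theorem pvBGo_false (i : Nat) (rest : List Bool) :
    pvBGo i (false :: rest) = pvBGo (i + 1) rest := by
  cases rest with
  | nil => simp [pvBGo]
  | cons c t =>
      cases c with
      | false =>
          rw [pvBGo, pvBGo]
          simp only [List.takeWhile_cons, List.dropWhile_cons, beq_self_eq_true, if_true,
            Bool.false_eq_true, if_false, List.length_cons]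
          have h : i + ((List.takeWhile (fun x => x == false) t).length + 1) + 1
              = i + 1 + (List.takeWhile (fun x => x == false) t).length + 1 := by omega
          rw [h]
      | true =>
          rw [pvBGo]
          simp

theorem pvInRun_eq (rest : List Bool) (s j : Nat) :
    pvInRun s j rest =
      [(s : Int), (j : Int) - 1 + (rest.takeWhile (fun x => x == true)).length] ::
        pvBGo (j + (rest.takeWhile (fun x => x == true)).length)
          (rest.dropWhile (fun x => x == true)) := by
  induction rest generalizing j with
  | nil => simp [pvInRun, pvBGo]
  | cons c t ih =>
      cases c with
      | true =>
          rw [pvInRun, ih]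
          simp only [List.takeWhile_cons, List.dropWhile_cons, beq_self_eq_true,
            if_true, List.length_cons]
          have h : j + 1 + (List.takeWhile (fun x => x == true) t).length
              = j + ((List.takeWhile (fun x => x == true) t).length + 1) := by omega
          rw [h]
          congr 2
          push_cast; ring
      | false =>
          rw [pvInRun]
          simp only [List.takeWhile_cons, List.dropWhile_cons]
          norm_num
          exact (pvBGo_false j t).symm

-- the joint loop invariant: A's loop equals B's grouping, in both flag states
theorem pvMain (l : List Bool) :
    (∀ i out, pvAGo i out true l = out ++ pvBGo i l) ∧
    (∀ i out (s : Nat), pvAGo i (out ++ [[(s : Int), (i : Int) - 1]]) false l = out ++ pvInRun s i l) := by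
  induction l with
  | nil => exact ⟨fun i out => by simp [pvAGo, pvBGo], fun i out s => by simp [pvAGo, pvInRun]⟩
  | cons b rest ih =>
      obtain ⟨ihT, ihF⟩ := ih
      constructor
      · intro i out
        cases b with
        | false =>
            rw [pvAGo, if_neg Bool.false_ne_true, ihT, pvBGo_false]
        | true =>
            rw [pvAGo, if_pos rfl]
            simp only [if_true]
            have h1 : pvSetLastEnd (out ++ [[(i : Int), (i : Int)]]) (i : Int)
                = out ++ [[(i : Int), (i : Int)]] := pvSetLastEnd_append out _ _ _
            have h2 : ((i : Int)) = ((i + 1 : Nat) : Int) - 1 := by push_cast; ring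
            have h3 := ihF (i + 1) out i
            rw [← h2] at h3
            rw [h1, h3, pvInRun_eq]
            rw [pvBGo]
            simp only [if_true]
            have e1 : ((i + 1 : Nat) : Int) - 1 + ((List.takeWhile (fun x => x == true) rest).length : Int)
                = ((i + (List.takeWhile (fun x => x == true) rest).length : Nat) : Int) := by push_cast; ring
            have e2 : i + 1 + (List.takeWhile (fun x => x == true) rest).length
                = i + (List.takeWhile (fun x => x == true) rest).length + 1 := by omega
            rw [e1, e2]
      · intro i out s
        cases b with
        | false =>
            rw [pvAGo, if_neg Bool.false_ne_true, pvInRun]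
            rw [ihT (i + 1) (out ++ [[(s : Int), (i : Int) - 1]])]
            simp
        | true =>
            rw [pvAGo, if_pos rfl]
            simp only [if_neg Bool.false_ne_true]
            have h1 : pvSetLastEnd (out ++ [[(s : Int), (i : Int) - 1]]) (i : Int)
                = out ++ [[(s : Int), (i : Int)]] := pvSetLastEnd_append out _ _ _
            have h2 : ((i : Int)) = ((i + 1 : Nat) : Int) - 1 := by push_cast; ring
            have h3 := ihF (i + 1) out s
            rw [← h2] at h3
            rw [h1, h3, pvInRun]

-- ===== VERDICT (by name: the statement is the Claim_ definition above) =====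
theorem boolsToRunLenghtIdx_py_spec : Claim_equal_boolsToRunLenghtIdx_py := by
  intro l _
  unfold Spec_boolsToRunLenghtIdx_py boolsToRunLenghtIdx_py boolsToRunLenghtIdx_py_alt
  simpa using (pvMain l).1 0 []
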